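-- pv_equiv track=rewrite | github.com/MetaSUB/MetaSUB-metadata | unpackaged_scripts/clean_parse_alina_mdata_tbl.py | bc_search
-- ===== SOURCE A (Python) =====
-- def bc_search(tkns, col):
--     try:
--         maybe_bc = tkns[col]
--     except IndexError:
--         return None
--     try:
--         int(maybe_bc)
--     except ValueError:
--         return bc_search(tkns, col + 1)
--     while len(maybe_bc) < 9:
--         maybe_bc = '0' + maybe_bc
--     return maybe_bc
-- ===== SOURCE B (Python) =====
-- def bc_search(tkns, col):
--     i = col
--     while True:
--         try:
--             tok = tkns[i]
--         except IndexError: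
--             return None
--         try:
--             int(tok)
--             break
--         except ValueError:
--             i += 1
--     return '0' * (9 - len(tok)) + tok
-- ===== Notes on version B (the rewrite author's own statement) =====
-- stated objective: simpler
-- what changed: A's self-recursion (recursing on col+1 with the pad folded into each call and a while-loop left-pad) is replaced by an iterative index scan that first locates the int-parsable token and then pads it once with an arithmetic left-pad.
import Mathlib
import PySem

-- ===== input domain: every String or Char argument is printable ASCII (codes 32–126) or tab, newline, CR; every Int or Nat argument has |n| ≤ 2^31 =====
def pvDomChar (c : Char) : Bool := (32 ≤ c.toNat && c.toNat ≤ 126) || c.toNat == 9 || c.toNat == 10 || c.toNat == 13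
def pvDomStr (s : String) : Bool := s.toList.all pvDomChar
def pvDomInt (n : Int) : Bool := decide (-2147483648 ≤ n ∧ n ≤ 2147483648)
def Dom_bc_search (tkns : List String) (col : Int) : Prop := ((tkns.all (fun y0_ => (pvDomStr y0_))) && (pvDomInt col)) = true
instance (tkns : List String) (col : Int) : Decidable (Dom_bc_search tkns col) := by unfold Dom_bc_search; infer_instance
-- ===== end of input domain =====

-- B rewrites A's self-recursion as an iterative index scan that first finds the token and
-- pads it afterwards with an arithmetic left-pad (objective: simpler; same cost).

-- ===== PORT A =====
-- A's 'while len(maybe_bc) < 9: maybe_bc = "0" + maybe_bc' on the code points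
-- (exact: '"0" + s' prepends one character).
def bc_padWhile (cs : List Char) : List Char :=
  if cs.length < 9 then bc_padWhile ('0' :: cs) else cs
termination_by 9 - cs.length

-- 'try: tkns[col] except IndexError: return None' ported as the in-range test
-- (exact: PySem.List.pyGet? tkns col = none ↔ ¬ InRange, i.e. exactly Python's IndexError);
-- inside the range tkns[col] is PySem.List.pyGetD.
def bc_search (tkns : List String) (col : Int) : Option String :=
  if h : PySem.Raise.InRange tkns.length col then
    let maybe_bc := PySem.List.pyGetD tkns col ""
    match PySem.Int.ofStr? maybe_bc with             -- int(maybe_bc); none = ValueError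
    | none => bc_search tkns (col + 1)
    | some _ => some (String.ofList (bc_padWhile maybe_bc.toList))
  else none
termination_by (tkns.length + 1 - col).toNat
decreasing_by obtain ⟨_, h2⟩ := h; omega

-- ===== PORT B =====
-- B's while-loop: advance i until tkns[i] parses as an int (break) or indexing
-- raises IndexError (return None); yields the found token.
def bc_findTok (tkns : List String) (i : Int) : Option String :=
  match hg : PySem.List.pyGet? tkns i with           -- try: tok = tkns[i] except IndexError
  | none => none
  | some tok =>
      match PySem.Int.ofStr? tok with                -- try: int(tok) except ValueError
      | some _ => some tok                           -- break
      | none => bc_findTok tkns (i + 1)              -- i += 1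
termination_by (tkns.length + 1 - i).toNat
decreasing_by
  by_cases hin : PySem.Raise.InRange tkns.length i
  · obtain ⟨_, h2⟩ := hin; omega
  · rw [(PySem.List.pyGet?_eq_none_iff tkns i).mpr hin] at hg; exact absurd hg (by simp)

-- '0' * (9 - len(tok)) + tok
def bc_pad9 (tok : String) : String :=
  String.ofList (List.replicate (9 - tok.toList.length) '0' ++ tok.toList)

def bc_search_alt (tkns : List String) (col : Int) : Option String :=
  (bc_findTok tkns col).map bc_pad9

-- ===== PRECONDITION & SPEC =====
def Spec_bc_search (tkns : List String) (col : Int) (out : Option String) : Prop := out = bc_search_alt tkns col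
instance (tkns : List String) (col : Int) (out : Option String) : Decidable (Spec_bc_search tkns col out) := by unfold Spec_bc_search; infer_instance

-- ===== CLAIM (what is proved, stated in full; the proofs are below) =====
def Claim_equal_bc_search : Prop := ∀ (tkns : List String) (col : Int), Dom_bc_search tkns col → Spec_bc_search tkns col (bc_search tkns col)

-- ===== LEMMAS AND PROOFS =====

-- the manual while-pad is the arithmetic left-pad
lemma bc_padWhile_eq (cs : List Char) :
    bc_padWhile cs = List.replicate (9 - cs.length) '0' ++ cs := by
  by_cases h : cs.length < 9
  · rw [bc_padWhile, if_pos h, bc_padWhile_eq ('0' :: cs)]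
    have h9 : 9 - cs.length = (9 - ('0' :: cs).length) + 1 := by
      simp only [List.length_cons]; omega
    rw [h9, List.replicate_succ']
    simp
  · rw [bc_padWhile, if_neg h]
    have h0 : 9 - cs.length = 0 := by omega
    simp [h0]
termination_by 9 - cs.length

lemma bc_main (tkns : List String) (col : Int) :
    bc_search tkns col = (bc_findTok tkns col).map bc_pad9 := by
  rw [bc_search, bc_findTok]
  by_cases h : PySem.Raise.InRange tkns.length col
  · rw [dif_pos h]
    have hg : PySem.List.pyGet? tkns col = some (PySem.List.pyGetD tkns col "") := by
      rcases hsome : PySem.List.pyGet? tkns col with _ | v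
      · exact absurd ((PySem.List.pyGet?_eq_none_iff tkns col).mp hsome) (not_not.mpr h)
      · simp [PySem.List.pyGetD, hsome]
    rw [hg]
    cases hof : PySem.Int.ofStr? (PySem.List.pyGetD tkns col "") with
    | none => simp only [hof]; simpa using bc_main tkns (col + 1)
    | some v => simp only [hof]; simp [bc_pad9, bc_padWhile_eq]
  · rw [dif_neg h, (PySem.List.pyGet?_eq_none_iff tkns col).mpr h]; rfl
termination_by (tkns.length + 1 - col).toNat
decreasing_by obtain ⟨_, h2⟩ := h; omega

-- ===== VERDICT (by name: the statement is the Claim_ definition above) =====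
theorem bc_search_spec : Claim_equal_bc_search := by
  intro tkns col _
  unfold Spec_bc_search bc_search_alt
  exact bc_main tkns col
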